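-- pv_equiv track=rewrite | github.com/NickMonks/AlgorithmsAndDataStructure | minimumPassesMatrix.py | convertNegatives2
-- ===== SOURCE A (Python) =====
-- def getAllPositivePositions(matrix):
-- 	# append positve values
-- 	positivePositions = []
-- 	for row in range(len(matrix)):
-- 		for col in range(len(matrix[row])):
-- 			value = matrix[row][col]
-- 			if value > 0:
-- 				positivePositions.append([row, col])
--
-- 	return positivePositions
--
-- def getAdjacentPositions(row, col, matrix):
-- 	adjacentPositions = []
--
-- 	if row > 0:
-- 		adjacentPositions.append([row -1, col])
-- 	if row < len(matrix) -1:
-- 		adjacentPositions.append([row+1, col])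
-- 	if col > 0:
-- 		adjacentPositions.append([row,col-1])
-- 	if col < len(matrix[0]) -1 :
-- 		adjacentPositions.append([row, col +1])
--
-- 	return adjacentPositions
--
-- def convertNegatives2(matrix):
--     queue = getAllPositivePositions(matrix)
--     passes = 0
--
--     while len(queue) >0:
--         currentSize = len(queue)
--
--         while currentSize > 0:
--             # note that we are using a normal array, and therefore the time complexity is actually O(N)
--             # but we can assume we are using a queue for now
--             currentRow, currentCol = queue.pop(0)
--             currentSize -= 1
--             adjacentPositions = getAdjacentPositions(currentRow, currentCol, matrix)
--
--             for position in adjacentPositions: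
--                 row, col = position
--                 value = matrix[row][col]
--                 if value < 0:
--                     matrix[row][col] = value * -1
--                     queue.append([row, col])
--
--
--         passes += 1
--
--     return passes
-- ===== SOURCE B (Python) =====
-- def _val(m, r, c):
--     # value at (r, c), treating out-of-bounds cells as 0
--     return m[r][c] if 0 <= r < len(m) and 0 <= c < len(m[r]) else 0
--
-- def _sweep(m):
--     # one synchronous Jacobi pass: flip every negative cell that currently
--     # has a positive 4-neighbour, reading only the snapshot m
--     return [[-v if v < 0 and (_val(m, r - 1, c) > 0 or _val(m, r + 1, c) > 0
--                               or _val(m, r, c - 1) > 0 or _val(m, r, c + 1) > 0) else v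
--              for c, v in enumerate(row)]
--             for r, row in enumerate(m)]
--
-- def convertNegatives2(matrix):
--     # Fixed-point iteration over whole-matrix snapshots: no queue at all.
--     # Each changing sweep corresponds to one BFS level; stop at the fixed point.
--     if not any(v > 0 for row in matrix for v in row):
--         return 0
--     passes = 1
--     cur = matrix
--     while True:
--         nxt = _sweep(cur)
--         if nxt == cur:
--             return passes
--         cur = nxt
--         passes += 1
-- ===== Notes on version B (the rewrite author's own statement) =====
-- stated objective: alternative
-- what changed: Replaces A's queue-based level BFS (seed positives, pop cells, flip negative neighbours) by a queue-free Jacobi fixed-point iteration: repeatedly build a whole-matrix snapshot in which every negative cell with a currently positive 4-neighbour is flipped, counting sweeps until the matrix stops changing; A mutates matrix in place while B does not (equivalence is about the return value).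
-- outside the precondition, e.g. on convertNegatives2([[3], [-1, -1]]): A returns 2, B returns 3
import Mathlib
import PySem

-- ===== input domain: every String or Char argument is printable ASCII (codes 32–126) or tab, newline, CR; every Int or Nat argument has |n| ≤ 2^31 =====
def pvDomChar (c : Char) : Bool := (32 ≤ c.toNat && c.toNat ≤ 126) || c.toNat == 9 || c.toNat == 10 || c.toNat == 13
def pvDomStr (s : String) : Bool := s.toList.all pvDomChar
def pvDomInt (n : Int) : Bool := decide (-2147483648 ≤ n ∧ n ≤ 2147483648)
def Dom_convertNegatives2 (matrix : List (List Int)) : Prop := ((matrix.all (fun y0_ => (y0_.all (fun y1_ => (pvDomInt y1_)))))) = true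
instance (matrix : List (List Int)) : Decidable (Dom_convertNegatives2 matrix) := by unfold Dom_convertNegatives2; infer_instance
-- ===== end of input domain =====

-- B replaces A's queue-based level BFS by a queue-free fixed-point iteration of
-- whole-matrix synchronous sweeps (flip every negative cell with a currently positive
-- 4-neighbour, counting changing sweeps). Python A mutates `matrix` in place, B does
-- not; the equivalence proved here is about the return value.

-- ===== PORT A =====
-- matrix cell read: exact for the indices A actually uses under Pre_ (all accessed
-- indices are nonnegative; out-of-range reads return 0, which only occurs where the
-- surrounding bounds guards of the Python already make the access irrelevant).
def pvGetRowCell : List Int → Int → Int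
  | [], _ => 0
  | x :: rest, c => if c = 0 then x else pvGetRowCell rest (c - 1)

def pvGetCell : List (List Int) → Int → Int → Int
  | [], _, _ => 0
  | row :: rest, r, c => if r = 0 then pvGetRowCell row c else pvGetCell rest (r - 1) c

-- matrix[row][col] = v : exact for the nonnegative in-range indices that occur under Pre_
def pvSetRowCell : List Int → Int → Int → List Int
  | [], _, _ => []
  | x :: rest, c, v => if c = 0 then v :: rest else x :: pvSetRowCell rest (c - 1) v

def pvSetCell : List (List Int) → Int → Int → Int → List (List Int)
  | [], _, _, _ => []
  | row :: rest, r, c, v => if r = 0 then pvSetRowCell row c v :: rest else row :: pvSetCell rest (r - 1) c v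

-- matrix[r] (r nonnegative in range under Pre_)
def pvRowAt : List (List Int) → Int → List Int
  | [], _ => []
  | row :: rest, r => if r = 0 then row else pvRowAt rest (r - 1)

-- getAllPositivePositions: the two nested for-range loops, as structural recursion with counters
def pvPosRow : List Int → Int → Int → List (Int × Int)
  | [], _, _ => []
  | v :: rest, r, c => (if v > 0 then [(r, c)] else []) ++ pvPosRow rest r (c + 1)

def pvPosAll : List (List Int) → Int → List (Int × Int)
  | [], _ => []
  | row :: rest, r => pvPosRow row r 0 ++ pvPosAll rest (r + 1)

-- len(matrix[0]) ported as (matrix.headD []).length: under Pre_ this helper is only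
-- reached with a nonempty matrix, where it is exact.
def getAdjacentPositions (row col : Int) (matrix : List (List Int)) : List (Int × Int) :=
  (if row > 0 then [(row - 1, col)] else []) ++
  (if row < (matrix.length : Int) - 1 then [(row + 1, col)] else []) ++
  (if col > 0 then [(row, col - 1)] else []) ++
  (if col < ((matrix.headD []).length : Int) - 1 then [(row, col + 1)] else [])

-- body of A's "for position in adjacentPositions" loop, folded over one popped node
def pvStepA (m : List (List Int)) (q : List (Int × Int)) (row col : Int) :
    List (List Int) × List (Int × Int) :=
  (getAdjacentPositions row col m).foldl
    (fun s p =>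
      let v := pvGetCell s.1 p.1 p.2
      if v < 0 then (pvSetCell s.1 p.1 p.2 (v * -1), s.2 ++ [p]) else s)
    (m, q)

-- inner "while currentSize > 0" loop: pops n nodes off the front of the queue
def pvInnerA : Nat → List (List Int) → List (Int × Int) → List (List Int) × List (Int × Int)
  | 0, m, q => (m, q)
  | _ + 1, m, [] => (m, [])  -- unreachable: currentSize ≤ len(queue)
  | n + 1, m, (r, c) :: rest =>
      let s := pvStepA m rest r c
      pvInnerA n s.1 s.2

def pvCells (m : List (List Int)) : Nat := (m.map List.length).sum

-- outer "while len(queue) > 0" loop; fuel = total number of cells + 1 bounds the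
-- number of BFS levels (proved sufficient below), so the port is exact on Pre_.
def pvOuterA : Nat → List (List Int) → List (Int × Int) → Int → Int
  | 0, _, _, passes => passes
  | f + 1, m, q, passes =>
      if q.length > 0 then
        let s := pvInnerA q.length m q
        pvOuterA f s.1 s.2 (passes + 1)
      else passes

def convertNegatives2 (matrix : List (List Int)) : Int :=
  pvOuterA (pvCells matrix + 1) matrix (pvPosAll matrix 0) 0

-- ===== PORT B =====
-- _val(m, r, c): the value at (r, c), out-of-bounds cells read as 0
def pvVal (m : List (List Int)) (r c : Int) : Int :=
  if 0 ≤ r ∧ r < (m.length : Int) ∧ 0 ≤ c ∧ c < ((pvRowAt m r).length : Int) then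
    pvGetCell m r c
  else 0

-- the "has a positive 4-neighbour" test of _sweep's comprehension
def pvHasPos (m : List (List Int)) (r c : Int) : Bool :=
  decide (0 < pvVal m (r - 1) c) || decide (0 < pvVal m (r + 1) c) ||
  decide (0 < pvVal m r (c - 1)) || decide (0 < pvVal m r (c + 1))

-- the inner comprehension of _sweep (c, v run over row; m is the snapshot)
def pvSweepRow (m : List (List Int)) : List Int → Int → Int → List Int
  | [], _, _ => []
  | v :: rest, r, c => (if v < 0 ∧ pvHasPos m r c = true then -v else v) :: pvSweepRow m rest r (c + 1)

-- the outer comprehension of _sweep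
def pvSweepRows (m : List (List Int)) : List (List Int) → Int → List (List Int)
  | [], _ => []
  | row :: rest, r => pvSweepRow m row r 0 :: pvSweepRows m rest (r + 1)

def pvSweep (m : List (List Int)) : List (List Int) := pvSweepRows m m 0

-- the "while True" loop; fuel = total number of cells + 1 bounds the number of
-- changing sweeps (proved sufficient below), so the port is exact on Pre_.
def pvLoopB : Nat → List (List Int) → Int → Int
  | 0, _, passes => passes
  | f + 1, cur, passes =>
      let nxt := pvSweep cur
      if nxt = cur then passes else pvLoopB f nxt (passes + 1)

def convertNegatives2_alt (matrix : List (List Int)) : Int :=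
  if matrix.any (fun row => row.any (fun v => 0 < v)) then
    pvLoopB (pvCells matrix + 1) matrix 1
  else 0

-- ===== PRECONDITION & SPEC =====
-- Pre_ excludes ragged matrices (rows of unequal length), on which A's adjacency bound
-- len(matrix[0]) raises IndexError or silently ignores cells beyond row 0's width.
def Pre_convertNegatives2 (matrix : List (List Int)) : Prop :=
  ∀ row ∈ matrix, row.length = (matrix.headD []).length
instance (matrix : List (List Int)) : Decidable (Pre_convertNegatives2 matrix) := by
  unfold Pre_convertNegatives2; infer_instance

def pvWitness_convertNegatives2 : List (List Int) := [[1, -2], [-3, -4]]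

def Spec_convertNegatives2 (matrix : List (List Int)) (out : Int) : Prop := out = convertNegatives2_alt matrix
instance (matrix : List (List Int)) (out : Int) : Decidable (Spec_convertNegatives2 matrix out) := by unfold Spec_convertNegatives2; infer_instance

-- ===== CLAIM (what is proved, stated in full; the proofs are below) =====
def Claim_equal_convertNegatives2 : Prop := ∀ (matrix : List (List Int)), Dom_convertNegatives2 matrix → Pre_convertNegatives2 matrix → Spec_convertNegatives2 matrix (convertNegatives2 matrix)

-- ===== LEMMAS AND PROOFS =====

-- The loop body of A's step fold, named for the proofs
def pvBodyA (s : List (List Int) × List (Int × Int)) (p : Int × Int) :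
    List (List Int) × List (Int × Int) :=
  let v := pvGetCell s.1 p.1 p.2
  if v < 0 then (pvSetCell s.1 p.1 p.2 (v * -1), s.2 ++ [p]) else s

lemma pvStepA_def (m : List (List Int)) (q : List (Int × Int)) (r c : Int) :
    pvStepA m q r c = (getAdjacentPositions r c m).foldl pvBodyA (m, q) := rfl

-- the 4-neighbourhood of a cell
def pvNb (p : Int × Int) : List (Int × Int) :=
  [(p.1 - 1, p.2), (p.1 + 1, p.2), (p.1, p.2 - 1), (p.1, p.2 + 1)]

def pvNegRow (row : List Int) : Nat := row.countP (fun v => decide (v < 0))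
def pvNeg (m : List (List Int)) : Nat := (m.map pvNegRow).sum

-- ---- basic cell lemmas ----

lemma pvGetRowCell_out (row : List Int) (c : Int) (h : c < 0 ∨ (row.length : Int) ≤ c) :
    pvGetRowCell row c = 0 := by
  induction row generalizing c with
  | nil => rfl
  | cons x rest ih =>
      simp only [List.length_cons] at h
      have hc : ¬ c = 0 := by rcases h with h | h <;> omega
      simp only [pvGetRowCell, hc, if_false]
      apply ih
      rcases h with h | h
      · left; omega
      · right; omega

lemma pvRowAt_out (m : List (List Int)) (r : Int) (h : r < 0 ∨ (m.length : Int) ≤ r) :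
    pvRowAt m r = [] := by
  induction m generalizing r with
  | nil => rfl
  | cons row rest ih =>
      simp only [List.length_cons] at h
      have hr : ¬ r = 0 := by rcases h with h | h <;> omega
      simp only [pvRowAt, hr, if_false]
      apply ih
      rcases h with h | h
      · left; omega
      · right; omega

lemma pvGetCell_eq_rowAt (m : List (List Int)) (r c : Int) :
    pvGetCell m r c = pvGetRowCell (pvRowAt m r) c := by
  induction m generalizing r with
  | nil => rfl
  | cons row rest ih =>
      by_cases hr : r = 0 <;> simp [pvGetCell, pvRowAt, hr, ih]

lemma pvGetCell_bounds (m : List (List Int)) (r c : Int) (h : pvGetCell m r c < 0) :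
    0 ≤ r ∧ r < (m.length : Int) ∧ 0 ≤ c ∧ c < ((pvRowAt m r).length : Int) := by
  rw [pvGetCell_eq_rowAt] at h
  have hc : ¬ (c < 0 ∨ ((pvRowAt m r).length : Int) ≤ c) := by
    intro h'; rw [pvGetRowCell_out _ _ h'] at h; omega
  have hr : ¬ (r < 0 ∨ (m.length : Int) ≤ r) := by
    intro h'; rw [pvRowAt_out _ _ h'] at h
    simp [pvGetRowCell] at h
  rw [not_or, not_lt, not_le] at hc hr
  exact ⟨hr.1, hr.2, hc.1, hc.2⟩

lemma pvSetRowCell_length (row : List Int) (c v : Int) :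
    (pvSetRowCell row c v).length = row.length := by
  induction row generalizing c with
  | nil => rfl
  | cons x rest ih => by_cases hc : c = 0 <;> simp [pvSetRowCell, hc, ih]

lemma pvSetCell_shape (m : List (List Int)) (r c v : Int) :
    (pvSetCell m r c v).map List.length = m.map List.length := by
  induction m generalizing r with
  | nil => rfl
  | cons row rest ih =>
      by_cases hr : r = 0 <;> simp [pvSetCell, hr, ih, pvSetRowCell_length]

-- ---- negative-count flip lemma ----

lemma pvFlipRow (row : List Int) (c : Int) (h : pvGetRowCell row c < 0) :
    pvNegRow (pvSetRowCell row c (pvGetRowCell row c * -1)) + 1 = pvNegRow row := by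
  induction row generalizing c with
  | nil => simp [pvGetRowCell] at h
  | cons x rest ih =>
      by_cases hc : c = 0
      · simp only [pvGetRowCell, hc, if_true] at h
        simp [pvSetRowCell, pvGetRowCell, hc, pvNegRow, List.countP_cons, h]
        omega
      · simp only [pvGetRowCell, hc, if_false] at h
        have := ih (c - 1) h
        simp only [pvSetRowCell, pvGetRowCell, hc, if_false, pvNegRow, List.countP_cons] at this ⊢
        omega

lemma pvFlip (m : List (List Int)) (r c : Int) (h : pvGetCell m r c < 0) :
    pvNeg (pvSetCell m r c (pvGetCell m r c * -1)) + 1 = pvNeg m := by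
  induction m generalizing r with
  | nil => simp [pvGetCell] at h
  | cons row rest ih =>
      by_cases hr : r = 0
      · simp only [pvGetCell, hr, if_true] at h
        have hh := pvFlipRow row c h
        rw [mul_neg_one] at hh
        simp [pvSetCell, pvGetCell, hr, pvNeg]
        omega
      · simp only [pvGetCell, hr, if_false] at h
        have := ih (r - 1) h
        simp only [pvSetCell, pvGetCell, hr, if_false, pvNeg, List.map_cons, List.sum_cons] at this ⊢
        omega

-- ---- fold invariants for A's per-node body ----

lemma pvBodyA_inv (s : List (List Int) × List (Int × Int)) (p : Int × Int) :
    pvNeg (pvBodyA s p).1 + (pvBodyA s p).2.length = pvNeg s.1 + s.2.length ∧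
    (pvBodyA s p).1.map List.length = s.1.map List.length := by
  unfold pvBodyA
  by_cases h : pvGetCell s.1 p.1 p.2 < 0
  · simp only [h, if_true]
    refine ⟨?_, pvSetCell_shape _ _ _ _⟩
    have hh := pvFlip s.1 p.1 p.2 h
    rw [mul_neg_one] at hh
    simp; omega
  · simp [h]

lemma pvFoldA_inv (l : List (Int × Int)) :
    ∀ (s : List (List Int) × List (Int × Int)),
      pvNeg (l.foldl pvBodyA s).1 + (l.foldl pvBodyA s).2.length = pvNeg s.1 + s.2.length ∧
      (l.foldl pvBodyA s).1.map List.length = s.1.map List.length := by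
  induction l with
  | nil => intro s; simp
  | cons p rest ih =>
      intro s
      have h1 := pvBodyA_inv s p
      have h2 := ih (pvBodyA s p)
      simp only [List.foldl_cons]
      exact ⟨by omega, h2.2.trans h1.2⟩

-- ---- factoring: the queue is only appended to ----

lemma pvFoldA_factor (l : List (Int × Int)) :
    ∀ (m : List (List Int)) (q : List (Int × Int)),
      l.foldl pvBodyA (m, q) =
        ((l.foldl pvBodyA (m, [])).1, q ++ (l.foldl pvBodyA (m, [])).2) := by
  induction l with
  | nil => intro m q; simp
  | cons p rest ih =>
      intro m q
      simp only [List.foldl_cons]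
      by_cases h : pvGetCell m p.1 p.2 < 0
      · simp only [pvBodyA, h, if_true]
        rw [ih (pvSetCell m p.1 p.2 (pvGetCell m p.1 p.2 * -1)) (q ++ [p]),
            ih (pvSetCell m p.1 p.2 (pvGetCell m p.1 p.2 * -1)) ([] ++ [p]),
            ih (pvSetCell m p.1 p.2 (pvGetCell m p.1 p.2 * -1)) []]
        simp
      · simp only [pvBodyA, h, if_false]
        exact ih m q

lemma pvStepA_factor (m : List (List Int)) (q : List (Int × Int)) (r c : Int) :
    pvStepA m q r c = ((pvStepA m [] r c).1, q ++ (pvStepA m [] r c).2) := by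
  simp only [pvStepA_def]; exact pvFoldA_factor _ m q

-- ---- shape predicate ----

def pvShape (m s : List (List Int)) : Prop :=
  s.map List.length = m.map List.length

lemma pvShape_rows (m s : List (List Int)) (hpre : Pre_convertNegatives2 m)
    (hs : pvShape m s) : ∀ row ∈ s, row.length = (m.headD []).length := by
  intro row hrow
  have : row.length ∈ s.map List.length := List.mem_map_of_mem hrow
  rw [hs] at this
  rcases List.mem_map.mp this with ⟨row', hrow', hlen⟩
  rw [← hlen]
  exact hpre row' hrow'

lemma pvShape_len (m s : List (List Int)) (hs : pvShape m s) : s.length = m.length := by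
  have := congrArg List.length hs
  simpa using this

lemma pvRowAt_len_le (s : List (List Int)) (r : Int) (L : Nat)
    (h : ∀ row ∈ s, row.length = L) : (pvRowAt s r).length ≤ L := by
  induction s generalizing r with
  | nil => simp [pvRowAt]
  | cons row rest ih =>
      by_cases hr : r = 0
      · simp [pvRowAt, hr, h row (by simp)]
      · simp only [pvRowAt, hr, if_false]
        exact ih (r - 1) (fun w hw => h w (by simp [hw]))

-- ---- no-op candidates: guard-false neighbours never flip anything ----

lemma pvBodyA_noop (s : List (List Int) × List (Int × Int)) (p : Int × Int)
    (h : pvGetCell s.1 p.1 p.2 = 0) : pvBodyA s p = s := by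
  simp [pvBodyA, h]

lemma pvGetCell_row_out (s : List (List Int)) (r c : Int)
    (h : r < 0 ∨ (s.length : Int) ≤ r) : pvGetCell s r c = 0 := by
  rw [pvGetCell_eq_rowAt, pvRowAt_out s r h]; rfl

lemma pvGetCell_col_out (s : List (List Int)) (r c : Int)
    (h : c < 0 ∨ ((pvRowAt s r).length : Int) ≤ c) : pvGetCell s r c = 0 := by
  rw [pvGetCell_eq_rowAt]; exact pvGetRowCell_out _ _ h

-- ---- smoothing: A's guarded candidate list acts like the full 4-candidate list ----

lemma pvBodyA_shape (m : List (List Int)) (s : List (List Int) × List (Int × Int))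
    (p : Int × Int) (hs : pvShape m s.1) : pvShape m (pvBodyA s p).1 :=
  (pvBodyA_inv s p).2.trans hs

lemma pvSmooth (m : List (List Int)) (r c : Int) (hpre : Pre_convertNegatives2 m) :
    ∀ (s : List (List Int) × List (Int × Int)), pvShape m s.1 →
      (getAdjacentPositions r c m).foldl pvBodyA s =
        [(r - 1, c), (r + 1, c), (r, c - 1), (r, c + 1)].foldl pvBodyA s := by
  intro s hs
  have e1 : ∀ (t : List (List Int) × List (Int × Int)),
      (if r > 0 then [((r : Int) - 1, c)] else []).foldl pvBodyA t = pvBodyA t (r - 1, c) := by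
    intro t; by_cases h : r > 0
    · simp [h]
    · simp only [h, if_false, List.foldl_nil]
      exact (pvBodyA_noop _ _ (pvGetCell_row_out _ _ _ (Or.inl (by omega)))).symm
  have e2 : ∀ (t : List (List Int) × List (Int × Int)), pvShape m t.1 →
      (if r < (m.length : Int) - 1 then [((r : Int) + 1, c)] else []).foldl pvBodyA t
        = pvBodyA t (r + 1, c) := by
    intro t ht; by_cases h : r < (m.length : Int) - 1
    · simp [h]
    · simp only [h, if_false, List.foldl_nil]
      refine (pvBodyA_noop _ _ (pvGetCell_row_out _ _ _ (Or.inr ?_))).symm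
      rw [pvShape_len m t.1 ht]; omega
  have e3 : ∀ (t : List (List Int) × List (Int × Int)),
      (if c > 0 then [((r : Int), c - 1)] else []).foldl pvBodyA t = pvBodyA t (r, c - 1) := by
    intro t; by_cases h : c > 0
    · simp [h]
    · simp only [h, if_false, List.foldl_nil]
      exact (pvBodyA_noop _ _ (pvGetCell_col_out _ _ _ (Or.inl (by omega)))).symm
  have e4 : ∀ (t : List (List Int) × List (Int × Int)), pvShape m t.1 →
      (if c < ((m.headD []).length : Int) - 1 then [((r : Int), c + 1)] else []).foldl pvBodyA t
        = pvBodyA t (r, c + 1) := by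
    intro t ht; by_cases h : c < ((m.headD []).length : Int) - 1
    · rw [if_pos h]; rfl
    · rw [if_neg h, List.foldl_nil]
      refine (pvBodyA_noop _ _ (pvGetCell_col_out _ _ _ (Or.inr ?_))).symm
      show ((pvRowAt t.1 r).length : Int) ≤ c + 1
      have := pvRowAt_len_le t.1 r _ (pvShape_rows m t.1 hpre ht)
      omega
  have hs1 : pvShape m (pvBodyA s (r - 1, c)).1 := pvBodyA_shape m s _ hs
  have hs2 : pvShape m (pvBodyA (pvBodyA s (r - 1, c)) (r + 1, c)).1 := pvBodyA_shape m _ _ hs1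
  have hs3 : pvShape m (pvBodyA (pvBodyA (pvBodyA s (r - 1, c)) (r + 1, c)) (r, c - 1)).1 :=
    pvBodyA_shape m _ _ hs2
  unfold getAdjacentPositions
  rw [List.foldl_append, List.foldl_append, List.foldl_append,
      e1 s, e2 _ hs1, e3 _, e4 _ hs3]
  simp [List.foldl]

-- ---- Pre_ transfers along equal shapes ----

lemma pvPre_of_shape (m s : List (List Int)) (hpre : Pre_convertNegatives2 m)
    (hs : pvShape m s) : Pre_convertNegatives2 s := by
  intro row hrow
  have hlen := pvShape_rows m s hpre hs row hrow
  have hhead : (s.headD []).length = (m.headD []).length := by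
    cases s with
    | nil =>
        cases m with
        | nil => rfl
        | cons a b => simp [pvShape] at hs
    | cons a b =>
        cases m with
        | nil => simp [pvShape] at hs
        | cons a' b' =>
            simp only [pvShape, List.map_cons, List.cons.injEq] at hs
            simpa using hs.1
  rw [hhead]; exact hlen

-- ---- the inner batch loop: measure and shape ----

lemma pvStepA_inv (m : List (List Int)) (q : List (Int × Int)) (r c : Int) :
    pvNeg (pvStepA m q r c).1 + (pvStepA m q r c).2.length = pvNeg m + q.length ∧
    pvShape m (pvStepA m q r c).1 := by
  rw [pvStepA_def]
  have := pvFoldA_inv (getAdjacentPositions r c m) (m, q)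
  exact ⟨this.1, this.2⟩

lemma pvInnerA_inv : ∀ (n : Nat) (m : List (List Int)) (q : List (Int × Int)), n ≤ q.length →
    pvNeg (pvInnerA n m q).1 + (pvInnerA n m q).2.length + n = pvNeg m + q.length ∧
    pvShape m (pvInnerA n m q).1 := by
  intro n
  induction n with
  | zero => intro m q _; simp [pvInnerA, pvShape]
  | succ n ih =>
      intro m q h
      match q with
      | [] => simp at h
      | (r, c) :: rest =>
          simp only [pvInnerA]
          have hst := pvStepA_inv m rest r c
          have hlen : n ≤ (pvStepA m rest r c).2.length := by
            rw [pvStepA_factor]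
            simp only [List.length_cons] at h
            simp; omega
          have := ih (pvStepA m rest r c).1 (pvStepA m rest r c).2 hlen
          refine ⟨?_, this.2.trans hst.2⟩
          simp only [List.length_cons]
          omega

-- ---- point update lemmas ----

lemma pvSetRowCell_get (row : List Int) (c v : Int) (hc0 : 0 ≤ c) (hc : c < (row.length : Int)) :
    ∀ c', pvGetRowCell (pvSetRowCell row c v) c' = if c' = c then v else pvGetRowCell row c' := by
  induction row generalizing c with
  | nil => simp at hc; omega
  | cons x rest ih =>
      intro c'
      by_cases h : c = 0
      · subst h
        by_cases h' : c' = 0 <;> simp [pvSetRowCell, pvGetRowCell, h']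
      · simp only [pvSetRowCell, h, if_false]
        by_cases h' : c' = 0
        · rw [if_neg (show ¬ c' = c by omega)]
          simp [pvGetRowCell, h']
        · have hrec := ih (c - 1) (by omega) (by simp at hc ⊢; omega) (c' - 1)
          have : (c' - 1 = c - 1) = (c' = c) := by
            apply propext; constructor <;> intro <;> omega
          simp [pvGetRowCell, h', hrec, this]

lemma pvSetCell_rowAt (m : List (List Int)) (r c v : Int) (hr0 : 0 ≤ r)
    (hr : r < (m.length : Int)) :
    ∀ r', pvRowAt (pvSetCell m r c v) r' =
      if r' = r then pvSetRowCell (pvRowAt m r) c v else pvRowAt m r' := by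
  induction m generalizing r with
  | nil => simp at hr; omega
  | cons row rest ih =>
      intro r'
      by_cases h : r = 0
      · subst h
        by_cases h' : r' = 0 <;> simp [pvSetCell, pvRowAt, h']
      · simp only [pvSetCell, h, if_false]
        by_cases h' : r' = 0
        · rw [if_neg (show ¬ r' = r by omega)]
          simp [pvRowAt, h']
        · have hrec := ih (r - 1) (by omega) (by simp at hr ⊢; omega) (r' - 1)
          simp only [pvRowAt, h', if_false, h]
          rw [hrec]
          by_cases hq : r' = r
          · rw [if_pos (by omega), if_pos hq]
          · rw [if_neg (by omega), if_neg hq]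

lemma pvGet_set (m : List (List Int)) (r c v r' c' : Int)
    (hb : 0 ≤ r ∧ r < (m.length : Int) ∧ 0 ≤ c ∧ c < ((pvRowAt m r).length : Int)) :
    pvGetCell (pvSetCell m r c v) r' c' =
      if r' = r ∧ c' = c then v else pvGetCell m r' c' := by
  rw [pvGetCell_eq_rowAt, pvGetCell_eq_rowAt,
      pvSetCell_rowAt m r c v hb.1 hb.2.1 r']
  by_cases hrr : r' = r
  · subst hrr
    rw [if_pos rfl]
    rw [pvSetRowCell_get (pvRowAt m r') c v hb.2.2.1 hb.2.2.2 c']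
    by_cases hcc : c' = c <;> simp [hcc]
  · simp [hrr]

-- ---- characterization of the fold over a nodup candidate list ----

lemma pvFoldA_char (l : List (Int × Int)) :
    ∀ (m : List (List Int)) (acc : List (Int × Int)), l.Nodup →
      (∀ p : Int × Int, pvGetCell (l.foldl pvBodyA (m, acc)).1 p.1 p.2 =
          if pvGetCell m p.1 p.2 < 0 ∧ p ∈ l then -(pvGetCell m p.1 p.2)
          else pvGetCell m p.1 p.2) ∧
      (∀ p : Int × Int, p ∈ (l.foldl pvBodyA (m, acc)).2 ↔
          p ∈ acc ∨ (pvGetCell m p.1 p.2 < 0 ∧ p ∈ l)) := by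
  induction l with
  | nil => intro m acc _; simp
  | cons p0 rest ih =>
      intro m acc hnd
      have hnd' : rest.Nodup := (List.nodup_cons.mp hnd).2
      have hp0 : p0 ∉ rest := (List.nodup_cons.mp hnd).1
      by_cases h : pvGetCell m p0.1 p0.2 < 0
      · have hb := pvGetCell_bounds m p0.1 p0.2 h
        have hbody : pvBodyA (m, acc) p0 =
            (pvSetCell m p0.1 p0.2 (-(pvGetCell m p0.1 p0.2)), acc ++ [p0]) := by
          simp [pvBodyA, h]
        have hget : ∀ p : Int × Int,
            pvGetCell (pvSetCell m p0.1 p0.2 (-(pvGetCell m p0.1 p0.2))) p.1 p.2 =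
            if p = p0 then -(pvGetCell m p0.1 p0.2) else pvGetCell m p.1 p.2 := by
          intro p
          have := pvGet_set m p0.1 p0.2 (-(pvGetCell m p0.1 p0.2)) p.1 p.2 hb
          rw [this]
          congr 1
          apply propext
          constructor
          · intro hh; exact Prod.ext hh.1 hh.2
          · intro hh; exact ⟨by rw [hh], by rw [hh]⟩
        obtain ⟨ihg, ihm⟩ := ih (pvSetCell m p0.1 p0.2 (-(pvGetCell m p0.1 p0.2)))
          (acc ++ [p0]) hnd'
        constructor
        · intro p
          simp only [List.foldl_cons, hbody]
          rw [ihg p, hget p]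
          by_cases hpp : p = p0
          · subst hpp
            have hmem : p ∉ rest := hp0
            simp [hmem, h]
          · rw [if_neg hpp]
            by_cases hmem : p ∈ rest
            · have h2 : p ∈ p0 :: rest := List.mem_cons_of_mem _ hmem
              simp [hmem, h2]
            · have h2 : p ∉ p0 :: rest := by
                intro hc
                rcases List.mem_cons.mp hc with h1 | h1
                · exact hpp h1
                · exact hmem h1
              simp [hmem, h2]
        · intro p
          simp only [List.foldl_cons, hbody]
          rw [ihm p, hget p]
          by_cases hpp : p = p0
          · subst hpp
            simp [h]
          · rw [if_neg hpp]
            constructor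
            · rintro (ha | hc)
              · rcases List.mem_append.mp ha with ha' | ha'
                · exact Or.inl ha'
                · exact absurd (List.mem_singleton.mp ha') hpp
              · exact Or.inr ⟨hc.1, List.mem_cons_of_mem _ hc.2⟩
            · rintro (ha | hc)
              · exact Or.inl (List.mem_append_left _ ha)
              · rcases List.mem_cons.mp hc.2 with h1 | h1
                · exact absurd h1 hpp
                · exact Or.inr ⟨hc.1, h1⟩
      · have hbody : pvBodyA (m, acc) p0 = (m, acc) := by simp [pvBodyA, h]
        obtain ⟨ihg, ihm⟩ := ih m acc hnd'
        constructor
        · intro p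
          simp only [List.foldl_cons, hbody]
          rw [ihg p]
          by_cases hpp : p = p0
          · subst hpp; simp [h, hp0]
          · by_cases hmem : p ∈ rest
            · have h2 : p ∈ p0 :: rest := List.mem_cons_of_mem _ hmem
              simp [hmem, h2]
            · have h2 : p ∉ p0 :: rest := by
                intro hc
                rcases List.mem_cons.mp hc with h1 | h1
                · exact hpp h1
                · exact hmem h1
              simp [hmem, h2]
        · intro p
          simp only [List.foldl_cons, hbody]
          rw [ihm p]
          by_cases hpp : p = p0
          · subst hpp; simp [h]
          · by_cases hmem : p ∈ rest
            · have h2 : p ∈ p0 :: rest := List.mem_cons_of_mem _ hmem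
              simp [hmem, h2]
            · have h2 : p ∉ p0 :: rest := by
                intro hc
                rcases List.mem_cons.mp hc with h1 | h1
                · exact hpp h1
                · exact hmem h1
              simp [hmem, h2]

lemma pvNb_nodup (p : Int × Int) : (pvNb p).Nodup := by
  simp [pvNb, Prod.ext_iff]
  omega

lemma pvNb_comm (p x : Int × Int) : x ∈ pvNb p ↔ p ∈ pvNb x := by
  simp [pvNb, Prod.ext_iff]
  omega

-- ---- one-node step characterization ----

lemma pvStepA_char (m : List (List Int)) (r c : Int) (hpre : Pre_convertNegatives2 m) :
    (∀ p : Int × Int, pvGetCell (pvStepA m [] r c).1 p.1 p.2 =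
        if pvGetCell m p.1 p.2 < 0 ∧ p ∈ pvNb (r, c) then -(pvGetCell m p.1 p.2)
        else pvGetCell m p.1 p.2) ∧
    (∀ p : Int × Int, p ∈ (pvStepA m [] r c).2 ↔
        pvGetCell m p.1 p.2 < 0 ∧ p ∈ pvNb (r, c)) := by
  rw [pvStepA_def, pvSmooth m r c hpre (m, []) rfl]
  have := pvFoldA_char [(r - 1, c), (r + 1, c), (r, c - 1), (r, c + 1)] m []
    (pvNb_nodup (r, c))
  exact ⟨this.1, fun p => by rw [this.2 p]; simp [pvNb]⟩

-- ---- a whole BFS level, reorganized node by node ----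

def pvProcLevel : List (Int × Int) → List (List Int) → List (List Int) × List (Int × Int)
  | [], m => (m, [])
  | x :: rest, m =>
      let s := pvStepA m [] x.1 x.2
      let t := pvProcLevel rest s.1
      (t.1, s.2 ++ t.2)

lemma pvInnerA_proc : ∀ (q : List (Int × Int)) (m : List (List Int)) (acc : List (Int × Int)),
    pvInnerA q.length m (q ++ acc) = ((pvProcLevel q m).1, acc ++ (pvProcLevel q m).2) := by
  intro q
  induction q with
  | nil => intro m acc; simp [pvInnerA, pvProcLevel]
  | cons x rest ih =>
      intro m acc
      rcases x with ⟨r, c⟩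
      simp only [List.length_cons, List.cons_append, pvInnerA, pvProcLevel]
      rw [pvStepA_factor m (rest ++ acc) r c]
      rw [show rest ++ acc ++ (pvStepA m [] r c).2 =
          rest ++ (acc ++ (pvStepA m [] r c).2) from by simp]
      rw [ih (pvStepA m [] r c).1 (acc ++ (pvStepA m [] r c).2)]
      simp

-- flip condition for a whole level: negative and adjacent to some queued cell
def pvFlipC (m : List (List Int)) (q : List (Int × Int)) (p : Int × Int) : Prop :=
  pvGetCell m p.1 p.2 < 0 ∧ ∃ x ∈ q, p ∈ pvNb x

lemma pvProcLevel_char : ∀ (q : List (Int × Int)) (m : List (List Int)),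
    Pre_convertNegatives2 m →
    (∀ p : Int × Int, pvFlipC m q p →
        pvGetCell (pvProcLevel q m).1 p.1 p.2 = -(pvGetCell m p.1 p.2)) ∧
    (∀ p : Int × Int, ¬ pvFlipC m q p →
        pvGetCell (pvProcLevel q m).1 p.1 p.2 = pvGetCell m p.1 p.2) ∧
    (∀ p : Int × Int, p ∈ (pvProcLevel q m).2 ↔ pvFlipC m q p) ∧
    pvShape m (pvProcLevel q m).1 := by
  intro q
  induction q with
  | nil =>
      intro m _
      refine ⟨?_, ?_, ?_, rfl⟩
      · rintro p ⟨_, x, hx, _⟩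
        exact absurd hx (List.not_mem_nil)
      · intro p _; rfl
      · intro p
        simp [pvProcLevel, pvFlipC]
  | cons x rest ih =>
      intro m hpre
      have hstep := pvStepA_char m x.1 x.2 hpre
      have hstepx : ∀ p : Int × Int, pvGetCell (pvStepA m [] x.1 x.2).1 p.1 p.2 =
          if pvGetCell m p.1 p.2 < 0 ∧ p ∈ pvNb x then -(pvGetCell m p.1 p.2)
          else pvGetCell m p.1 p.2 := fun p => hstep.1 p
      have hstepm : ∀ p : Int × Int, p ∈ (pvStepA m [] x.1 x.2).2 ↔
          pvGetCell m p.1 p.2 < 0 ∧ p ∈ pvNb x := fun p => hstep.2 p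
      have hshape : pvShape m (pvStepA m [] x.1 x.2).1 := (pvStepA_inv m [] x.1 x.2).2
      have hpre' : Pre_convertNegatives2 (pvStepA m [] x.1 x.2).1 :=
        pvPre_of_shape m _ hpre hshape
      obtain ⟨ihpos, ihneg, ihm, ihs⟩ := ih (pvStepA m [] x.1 x.2).1 hpre'
      have hcase : ∀ p : Int × Int, pvGetCell m p.1 p.2 < 0 ∧ p ∈ pvNb x →
          pvGetCell (pvProcLevel (x :: rest) m).1 p.1 p.2 = -(pvGetCell m p.1 p.2) := by
        intro p h1
        have hflip : pvGetCell (pvStepA m [] x.1 x.2).1 p.1 p.2 = -(pvGetCell m p.1 p.2) := by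
          rw [hstepx p, if_pos h1]
        have hnf : ¬ pvFlipC (pvStepA m [] x.1 x.2).1 rest p := by
          intro hc
          have := hc.1
          rw [hflip] at this
          omega
        show pvGetCell (pvProcLevel rest (pvStepA m [] x.1 x.2).1).1 p.1 p.2 = _
        rw [ihneg p hnf, hflip]
      have hsame : ∀ p : Int × Int, ¬ (pvGetCell m p.1 p.2 < 0 ∧ p ∈ pvNb x) →
          pvGetCell (pvStepA m [] x.1 x.2).1 p.1 p.2 = pvGetCell m p.1 p.2 := by
        intro p h1
        rw [hstepx p, if_neg h1]
      refine ⟨?_, ?_, ?_, ?_⟩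
      · intro p hf
        by_cases h1 : pvGetCell m p.1 p.2 < 0 ∧ p ∈ pvNb x
        · exact hcase p h1
        · obtain ⟨hneg, y, hy, hpy⟩ := hf
          rcases List.mem_cons.mp hy with rfl | hy'
          · exact absurd ⟨hneg, hpy⟩ h1
          · show pvGetCell (pvProcLevel rest (pvStepA m [] x.1 x.2).1).1 p.1 p.2 = _
            rw [ihpos p ⟨by rw [hsame p h1]; exact hneg, y, hy', hpy⟩, hsame p h1]
      · intro p hf
        have h1 : ¬ (pvGetCell m p.1 p.2 < 0 ∧ p ∈ pvNb x) := by
          intro hc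
          exact hf ⟨hc.1, x, List.mem_cons_self, hc.2⟩
        have h2 : ¬ pvFlipC (pvStepA m [] x.1 x.2).1 rest p := by
          rintro ⟨hneg, y, hy, hpy⟩
          rw [hsame p h1] at hneg
          exact hf ⟨hneg, y, List.mem_cons_of_mem _ hy, hpy⟩
        show pvGetCell (pvProcLevel rest (pvStepA m [] x.1 x.2).1).1 p.1 p.2 = _
        rw [ihneg p h2, hsame p h1]
      · intro p
        show p ∈ (pvStepA m [] x.1 x.2).2 ++ (pvProcLevel rest (pvStepA m [] x.1 x.2).1).2 ↔ _
        rw [List.mem_append, hstepm p, ihm p]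
        by_cases h1 : pvGetCell m p.1 p.2 < 0 ∧ p ∈ pvNb x
        · constructor
          · intro _; exact ⟨h1.1, x, List.mem_cons_self, h1.2⟩
          · intro _; exact Or.inl h1
        · constructor
          · rintro (hc | ⟨hneg, y, hy, hpy⟩)
            · exact absurd hc h1
            · rw [hsame p h1] at hneg
              exact ⟨hneg, y, List.mem_cons_of_mem _ hy, hpy⟩
          · rintro ⟨hneg, y, hy, hpy⟩
            rcases List.mem_cons.mp hy with rfl | hy'
            · exact absurd ⟨hneg, hpy⟩ h1
            · exact Or.inr ⟨by rw [hsame p h1]; exact hneg, y, hy', hpy⟩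
      · show pvShape m (pvProcLevel rest (pvStepA m [] x.1 x.2).1).1
        exact ihs.trans hshape

-- ---- the sweep: pointwise characterization ----

lemma pvVal_eq (m : List (List Int)) (r c : Int) : pvVal m r c = pvGetCell m r c := by
  unfold pvVal
  split <;> rename_i h
  · rfl
  · rcases not_and_or.mp h with h1 | h1
    · exact (pvGetCell_row_out m r c (Or.inl (by omega))).symm
    · rcases not_and_or.mp h1 with h2 | h2
      · exact (pvGetCell_row_out m r c (Or.inr (by omega))).symm
      · rcases not_and_or.mp h2 with h3 | h3
        · exact (pvGetCell_col_out m r c (Or.inl (by omega))).symm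
        · exact (pvGetCell_col_out m r c (Or.inr (by omega))).symm

lemma pvHasPos_iff (m : List (List Int)) (r c : Int) :
    pvHasPos m r c = true ↔ ∃ x ∈ pvNb (r, c), 0 < pvGetCell m x.1 x.2 := by
  simp [pvHasPos, pvVal_eq, pvNb]
  tauto

lemma pvSweepRows_rowAt (m : List (List Int)) :
    ∀ (rows : List (List Int)) (r0 r : Int),
      pvRowAt (pvSweepRows m rows r0) r = pvSweepRow m (pvRowAt rows r) (r0 + r) 0 := by
  intro rows
  induction rows with
  | nil => intro r0 r; simp [pvSweepRows, pvRowAt, pvSweepRow]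
  | cons row rest ih =>
      intro r0 r
      by_cases h : r = 0
      · subst h; simp [pvSweepRows, pvRowAt]
      · simp only [pvSweepRows, pvRowAt, h, if_false]
        rw [ih (r0 + 1) (r - 1)]
        congr 1
        omega

lemma pvSweepRow_get (m : List (List Int)) :
    ∀ (row : List Int) (r c0 c : Int),
      pvGetRowCell (pvSweepRow m row r c0) c =
        if pvGetRowCell row c < 0 ∧ pvHasPos m r (c0 + c) = true then -(pvGetRowCell row c)
        else pvGetRowCell row c := by
  intro row
  induction row with
  | nil => intro r c0 c; simp [pvSweepRow, pvGetRowCell]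
  | cons v rest ih =>
      intro r c0 c
      by_cases h : c = 0
      · subst h
        simp [pvSweepRow, pvGetRowCell]
      · simp only [pvSweepRow, pvGetRowCell, h, if_false]
        rw [ih r (c0 + 1) (c - 1)]
        have he : c0 + 1 + (c - 1) = c0 + c := by omega
        rw [he]

lemma pvSweep_get (m : List (List Int)) (r c : Int) :
    pvGetCell (pvSweep m) r c =
      if pvGetCell m r c < 0 ∧ pvHasPos m r c = true then -(pvGetCell m r c)
      else pvGetCell m r c := by
  rw [pvGetCell_eq_rowAt, pvSweep, pvSweepRows_rowAt m m 0 r,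
      pvSweepRow_get m (pvRowAt m r) (0 + r) 0 c, pvGetCell_eq_rowAt]
  norm_num

lemma pvSweepRow_length (m : List (List Int)) :
    ∀ (row : List Int) (r c : Int), (pvSweepRow m row r c).length = row.length := by
  intro row
  induction row with
  | nil => intro r c; rfl
  | cons v rest ih => intro r c; simp [pvSweepRow, ih]

lemma pvSweep_shape (m : List (List Int)) : pvShape m (pvSweep m) := by
  show (pvSweep m).map List.length = m.map List.length
  rw [pvSweep]
  have : ∀ (rows : List (List Int)) (r0 : Int),
      (pvSweepRows m rows r0).map List.length = rows.map List.length := by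
    intro rows
    induction rows with
    | nil => intro r0; rfl
    | cons row rest ih => intro r0; simp [pvSweepRows, pvSweepRow_length, ih]
  exact this m 0

-- ---- extensionality from pointwise reads ----

lemma pvRowExt : ∀ (r1 r2 : List Int), r1.length = r2.length →
    (∀ c : Int, pvGetRowCell r1 c = pvGetRowCell r2 c) → r1 = r2 := by
  intro r1
  induction r1 with
  | nil => intro r2 hl _; cases r2 with
      | nil => rfl
      | cons y t => simp at hl
  | cons x t1 ih =>
      intro r2 hl h
      cases r2 with
      | nil => simp at hl
      | cons y t2 =>
          have hx : x = y := by have := h 0; simpa [pvGetRowCell] using this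
          have ht : t1 = t2 := by
            apply ih t2 (by simpa using hl)
            intro c
            by_cases hc : c < 0
            · rw [pvGetRowCell_out t1 c (Or.inl hc), pvGetRowCell_out t2 c (Or.inl hc)]
            · have := h (c + 1)
              have hne : ¬ (c + 1 = 0) := by omega
              simpa [pvGetRowCell, hne] using this
          rw [hx, ht]

lemma pvMatExt : ∀ (m1 m2 : List (List Int)), m1.map List.length = m2.map List.length →
    (∀ r c : Int, pvGetCell m1 r c = pvGetCell m2 r c) → m1 = m2 := by
  intro m1
  induction m1 with
  | nil => intro m2 hl _; cases m2 with
      | nil => rfl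
      | cons y t => simp at hl
  | cons a t1 ih =>
      intro m2 hl h
      cases m2 with
      | nil => simp at hl
      | cons b t2 =>
          simp only [List.map_cons, List.cons.injEq] at hl
          have ha : a = b := by
            apply pvRowExt a b hl.1
            intro c
            have := h 0 c
            simpa [pvGetCell] using this
          have ht : t1 = t2 := by
            apply ih t2 hl.2
            intro r c
            by_cases hr : r < 0
            · rw [pvGetCell_row_out t1 r c (Or.inl hr), pvGetCell_row_out t2 r c (Or.inl hr)]
            · have := h (r + 1) c
              have hne : ¬ (r + 1 = 0) := by omega
              simpa [pvGetCell, hne] using this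
          rw [ha, ht]

-- ---- frontier invariant ----

def pvInv (m : List (List Int)) (q : List (Int × Int)) : Prop :=
  (∀ x ∈ q, 0 < pvGetCell m x.1 x.2) ∧
  (∀ p x : Int × Int, pvGetCell m p.1 p.2 < 0 → x ∈ pvNb p →
      0 < pvGetCell m x.1 x.2 → x ∈ q)

lemma pvFlipC_iff (m : List (List Int)) (q : List (Int × Int)) (hinv : pvInv m q)
    (p : Int × Int) :
    pvFlipC m q p ↔ pvGetCell m p.1 p.2 < 0 ∧ ∃ x ∈ pvNb p, 0 < pvGetCell m x.1 x.2 := by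
  constructor
  · rintro ⟨hneg, x, hxq, hpnb⟩
    exact ⟨hneg, x, (pvNb_comm x p).mp hpnb, hinv.1 x hxq⟩
  · rintro ⟨hneg, x, hxnb, hxpos⟩
    exact ⟨hneg, x, hinv.2 p x hneg hxnb hxpos, (pvNb_comm p x).mp hxnb⟩

lemma pvLevel_eq_sweep (m : List (List Int)) (q : List (Int × Int))
    (hpre : Pre_convertNegatives2 m) (hinv : pvInv m q) :
    (pvProcLevel q m).1 = pvSweep m := by
  obtain ⟨hgp, hgn, _, hs⟩ := pvProcLevel_char q m hpre
  apply pvMatExt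
  · exact hs.trans (pvSweep_shape m).symm
  · intro r c
    rw [pvSweep_get m r c]
    have hiff := pvFlipC_iff m q hinv (r, c)
    by_cases hc : pvFlipC m q (r, c)
    · rw [hgp (r, c) hc]
      obtain ⟨h1, x, hx, h2⟩ := hiff.mp hc
      rw [if_pos ⟨h1, (pvHasPos_iff m r c).mpr ⟨x, hx, h2⟩⟩]
    · rw [hgn (r, c) hc]
      have hnp : ¬ (pvGetCell m r c < 0 ∧ pvHasPos m r c = true) := by
        intro hh
        exact hc (hiff.mpr ⟨hh.1, (pvHasPos_iff m r c).mp hh.2⟩)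
      rw [if_neg hnp]

lemma pvInv_preserved (m : List (List Int)) (q : List (Int × Int))
    (hpre : Pre_convertNegatives2 m) (hinv : pvInv m q) :
    pvInv (pvProcLevel q m).1 (pvProcLevel q m).2 := by
  obtain ⟨hgp, hgn, hm, _⟩ := pvProcLevel_char q m hpre
  constructor
  · intro x hx
    have hfc := (hm x).mp hx
    rw [hgp x hfc]
    have := hfc.1
    omega
  · intro p x hneg hxnb hxpos
    have hfcp : ¬ pvFlipC m q p := by
      intro hc
      rw [hgp p hc] at hneg
      have := hc.1
      omega
    have hnegm : pvGetCell m p.1 p.2 < 0 := by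
      rw [hgn p hfcp] at hneg
      exact hneg
    rw [hm x]
    by_cases hfx : pvFlipC m q x
    · exact hfx
    · exfalso
      rw [hgn x hfx] at hxpos
      have hxq : x ∈ q := hinv.2 p x hnegm hxnb hxpos
      exact hfcp ⟨hnegm, x, hxq, (pvNb_comm p x).mp hxnb⟩

-- ---- seeds ----

lemma pvPosRow_mem : ∀ (row : List Int) (r c0 : Int) (p : Int × Int),
    p ∈ pvPosRow row r c0 ↔ p.1 = r ∧ c0 ≤ p.2 ∧ 0 < pvGetRowCell row (p.2 - c0) := by
  intro row
  induction row with
  | nil => intro r c0 p; simp [pvPosRow, pvGetRowCell]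
  | cons v rest ih =>
      intro r c0 p
      simp only [pvPosRow, List.mem_append]
      rw [ih r (c0 + 1) p]
      constructor
      · rintro (h | ⟨h1, h2, h3⟩)
        · have hv : v > 0 ∧ p = (r, c0) := by
            by_cases hh : v > 0
            · simp [hh] at h; exact ⟨hh, h⟩
            · simp [hh] at h
          obtain ⟨hv1, rfl⟩ := hv
          refine ⟨rfl, le_refl _, ?_⟩
          have he : ((r, c0) : Int × Int).2 - c0 = 0 := by norm_num
          rw [he]
          simpa [pvGetRowCell] using hv1
        · refine ⟨h1, by omega, ?_⟩
          have hne : ¬ (p.2 - c0 = 0) := by omega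
          simp only [pvGetRowCell, hne, if_false]
          have : p.2 - c0 - 1 = p.2 - (c0 + 1) := by omega
          rw [this]
          exact h3
      · rintro ⟨h1, h2, h3⟩
        by_cases hc : p.2 = c0
        · left
          have h3' : 0 < v := by simpa [pvGetRowCell, hc] using h3
          simp [Prod.ext_iff, h1, hc, h3']
        · right
          refine ⟨h1, by omega, ?_⟩
          have hne : ¬ (p.2 - c0 = 0) := by omega
          simp only [pvGetRowCell, hne, if_false] at h3
          have : p.2 - c0 - 1 = p.2 - (c0 + 1) := by omega
          rwa [this] at h3

lemma pvPosAll_mem : ∀ (rows : List (List Int)) (r0 : Int) (p : Int × Int),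
    p ∈ pvPosAll rows r0 ↔ r0 ≤ p.1 ∧ 0 < pvGetRowCell (pvRowAt rows (p.1 - r0)) p.2 := by
  intro rows
  induction rows with
  | nil => intro r0 p; simp [pvPosAll, pvRowAt, pvGetRowCell]
  | cons row rest ih =>
      intro r0 p
      simp only [pvPosAll, List.mem_append]
      rw [pvPosRow_mem row r0 0 p, ih (r0 + 1) p]
      constructor
      · rintro (⟨h1, h2, h3⟩ | ⟨h1, h2⟩)
        · refine ⟨by omega, ?_⟩
          have : p.1 - r0 = 0 := by omega
          simp only [pvRowAt, this]
          simpa using h3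
        · refine ⟨by omega, ?_⟩
          have hne : ¬ (p.1 - r0 = 0) := by omega
          simp only [pvRowAt, hne, if_false]
          have : p.1 - r0 - 1 = p.1 - (r0 + 1) := by omega
          rw [this]
          exact h2
      · rintro ⟨h1, h2⟩
        by_cases hr : p.1 = r0
        · left
          have h2' : 0 < pvGetRowCell row p.2 := by simpa [pvRowAt, hr] using h2
          refine ⟨hr, ?_, by simpa using h2'⟩
          by_contra hneg
          rw [pvGetRowCell_out row p.2 (Or.inl (by omega))] at h2'
          omega
        · right
          refine ⟨by omega, ?_⟩
          have hne : ¬ (p.1 - r0 = 0) := by omega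
          simp only [pvRowAt, hne, if_false] at h2
          have : p.1 - r0 - 1 = p.1 - (r0 + 1) := by omega
          rwa [this] at h2

lemma pvPos_char (m : List (List Int)) (p : Int × Int) :
    p ∈ pvPosAll m 0 ↔ 0 < pvGetCell m p.1 p.2 := by
  rw [pvPosAll_mem m 0 p, pvGetCell_eq_rowAt]
  simp only [sub_zero]
  constructor
  · rintro ⟨_, h⟩; exact h
  · intro h
    refine ⟨?_, h⟩
    by_contra hr
    rw [pvRowAt_out m p.1 (Or.inl (by omega))] at h
    simp [pvGetRowCell] at h

lemma pvInv_init (m : List (List Int)) : pvInv m (pvPosAll m 0) := by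
  constructor
  · intro x hx; exact (pvPos_char m x).mp hx
  · intro p x _ _ hxpos; exact (pvPos_char m x).mpr hxpos

lemma pvPosRow_nil : ∀ (row : List Int) (r c : Int),
    (pvPosRow row r c = []) ↔ row.any (fun v => 0 < v) = false := by
  intro row
  induction row with
  | nil => intro r c; simp [pvPosRow]
  | cons v rest ih =>
      intro r c
      by_cases h : v > 0 <;> simp [pvPosRow, h, ih r (c + 1)]

lemma pvPosAll_nil : ∀ (rows : List (List Int)) (r : Int),
    (pvPosAll rows r = []) ↔ rows.any (fun row => row.any (fun v => 0 < v)) = false := by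
  intro rows
  induction rows with
  | nil => intro r; simp [pvPosAll]
  | cons row rest ih =>
      intro r
      simp [pvPosAll, pvPosRow_nil row r 0, ih (r + 1)]

-- ---- fuel bound ----

lemma pvPosRow_bound : ∀ (row : List Int) (r c : Int),
    pvNegRow row + (pvPosRow row r c).length ≤ row.length := by
  intro row
  induction row with
  | nil => intro r c; simp [pvNegRow, pvPosRow]
  | cons v rest ih =>
      intro r c
      have := ih r (c + 1)
      by_cases h : v > 0 <;>
        simp [pvNegRow, pvPosRow, List.countP_cons, h] at this ⊢ <;>
        split_ifs <;> omega

lemma pvBound : ∀ (m : List (List Int)) (r : Int),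
    pvNeg m + (pvPosAll m r).length ≤ pvCells m := by
  intro m
  induction m with
  | nil => intro r; simp [pvNeg, pvPosAll, pvCells]
  | cons row rest ih =>
      intro r
      have h1 := pvPosRow_bound row r 0
      have h2 := ih (r + 1)
      simp only [pvNeg, pvPosAll, pvCells, List.map_cons, List.sum_cons, List.length_append] at h1 h2 ⊢
      omega

-- ---- main simulation: level BFS = sweeps ----

lemma pvOuterA_nil : ∀ (f : Nat) (m : List (List Int)) (p : Int),
    pvOuterA f m [] p = p := by
  intro f m p; cases f <;> simp [pvOuterA]

lemma pvMain : ∀ (fB fA : Nat) (m : List (List Int)) (q : List (Int × Int)) (passes : Int),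
    Pre_convertNegatives2 m → pvInv m q → q ≠ [] →
    pvNeg m + q.length ≤ fA → pvNeg m < fB →
    pvOuterA fA m q passes = pvLoopB fB m (passes + 1) := by
  intro fB
  induction fB with
  | zero => intro fA m q passes _ _ _ _ h; omega
  | succ fB ih =>
      intro fA m q passes hpre hinv hq hfA hfB
      have hql : 1 ≤ q.length := by
        cases q with
        | nil => exact absurd rfl hq
        | cons a b => simp
      obtain ⟨fA', rfl⟩ : ∃ k, fA = k + 1 := ⟨fA - 1, by omega⟩
      have hproc : pvInnerA q.length m q = ((pvProcLevel q m).1, (pvProcLevel q m).2) := by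
        have := pvInnerA_proc q m []
        simpa using this
      have hstep : pvOuterA (fA' + 1) m q passes =
          pvOuterA fA' (pvProcLevel q m).1 (pvProcLevel q m).2 (passes + 1) := by
        simp only [pvOuterA]
        rw [if_pos (by omega)]
        rw [hproc]
      have hmeasure := pvInnerA_inv q.length m q le_rfl
      rw [hproc] at hmeasure
      dsimp only at hmeasure
      have hshape : pvShape m (pvProcLevel q m).1 := hmeasure.2
      have hsweep : pvSweep m = (pvProcLevel q m).1 := (pvLevel_eq_sweep m q hpre hinv).symm
      by_cases hQ : (pvProcLevel q m).2 = []
      · -- no flips this level: fixed point reached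
        have hMeq : (pvProcLevel q m).1 = m := by
          obtain ⟨_, hgn, hm, _⟩ := pvProcLevel_char q m hpre
          apply pvMatExt _ _ hshape
          intro r c
          apply hgn (r, c)
          intro hc
          have := (hm (r, c)).mpr hc
          rw [hQ] at this
          exact absurd this (List.not_mem_nil)
        rw [hstep, hQ, hMeq, pvOuterA_nil]
        simp only [pvLoopB]
        rw [if_pos (by rw [hsweep, hMeq])]
      · -- some flips: recurse
        have hQl : 1 ≤ (pvProcLevel q m).2.length := by
          cases h : (pvProcLevel q m).2 with
          | nil => exact absurd h hQ
          | cons a b => simp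
        have hdec : pvNeg (pvProcLevel q m).1 + (pvProcLevel q m).2.length = pvNeg m := by
          omega
        have hlt : pvNeg (pvProcLevel q m).1 < pvNeg m := by omega
        have hMne : pvSweep m ≠ m := by
          rw [hsweep]
          intro hh
          rw [hh] at hlt
          omega
        rw [hstep]
        rw [ih fA' (pvProcLevel q m).1 (pvProcLevel q m).2 (passes + 1)
          (pvPre_of_shape m _ hpre hshape) (pvInv_preserved m q hpre hinv) hQ
          (by omega) (by omega)]
        conv_rhs => rw [pvLoopB]
        rw [if_neg hMne, hsweep]

-- ===== VERDICT (by name: the statement is the Claim_ definition above) =====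
theorem convertNegatives2_spec : Claim_equal_convertNegatives2 := by
  intro matrix _ hpre
  unfold Spec_convertNegatives2 convertNegatives2 convertNegatives2_alt
  by_cases hempty : pvPosAll matrix 0 = []
  · rw [hempty, pvOuterA_nil]
    rw [if_neg (by rw [(pvPosAll_nil matrix 0).mp hempty]; simp)]
  · have hany : matrix.any (fun row => row.any (fun v => 0 < v)) = true := by
      by_contra h
      exact hempty ((pvPosAll_nil matrix 0).mpr (by revert h; cases matrix.any (fun row => row.any (fun v => 0 < v)) <;> simp))
    rw [if_pos hany]
    have hb := pvBound matrix 0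
    have := pvMain (pvCells matrix + 1) (pvCells matrix + 1) matrix (pvPosAll matrix 0) 0
      hpre (pvInv_init matrix) hempty (by omega) (by omega)
    rw [this]
    norm_num
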